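-- pv_equiv track=rewrite | github.com/sachiel-x/Python-Daily-Challenge | EIGHT.py | sq_count
-- ===== SOURCE A (Python) =====
-- def sq_count(num, dig):
--
--     l1=[]
--     s1=""
--     c=str(dig)
--     count=0
--
--
--     for i in range(1, num+1):
--         l1.append(str(i**2))
--
--     s1="".join(l1)
--
--     for i in s1:
--         if i == c:
--             count += 1
--
--     return count
-- ===== SOURCE B (Python) =====
-- def sq_count(num, dig):
--     # Arithmetic reformulation: no string building at all. A's scan counts the
--     # character str(dig) among digits of the squares; that is nonzero only when
--     # dig is a single digit 0..9, in which case we tally dig directly by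
--     # divmod digit extraction over each square.
--     if dig < 0 or dig > 9:
--         return 0
--     total = 0
--     for i in range(1, num + 1):
--         n = i * i
--         while n > 0:
--             n, r = divmod(n, 10)
--             if r == dig:
--                 total += 1
--     return total
-- ===== Notes on version B (the rewrite author's own statement) =====
-- stated objective: alternative
-- what changed: B does no string work at all: it observes the count can only be nonzero when dig is a single digit 0..9 (otherwise str(dig) never equals one character) and then tallies dig by divmod digit extraction over each square i*i, instead of A's build-list/join/char-scan over str(i*i).
import Mathlib
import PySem

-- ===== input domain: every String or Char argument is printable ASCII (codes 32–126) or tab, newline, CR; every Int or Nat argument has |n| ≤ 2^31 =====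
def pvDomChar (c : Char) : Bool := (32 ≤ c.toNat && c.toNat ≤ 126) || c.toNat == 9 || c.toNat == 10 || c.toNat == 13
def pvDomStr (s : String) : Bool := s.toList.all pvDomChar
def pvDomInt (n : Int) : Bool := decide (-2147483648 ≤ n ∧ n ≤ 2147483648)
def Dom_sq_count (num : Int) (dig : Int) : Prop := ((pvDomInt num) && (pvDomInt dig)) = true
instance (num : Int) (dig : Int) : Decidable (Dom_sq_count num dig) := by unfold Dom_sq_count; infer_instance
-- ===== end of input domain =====

-- B replaces A's string building and char scan with pure divmod digit arithmetic
-- (the count is nonzero only when dig is a single digit 0..9); alternative, no strings at all.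

-- ===== PORT A =====
def sq_count (num : Int) (dig : Int) : Int :=
  let c := PySem.Int.toStr dig
  -- l1.append(str(i**2)) in a loop: Python's amortized-O(1) append is modelled by
  -- cons-accumulation with ONE reverse at the end (same list, evaluable in linear time)
  let l1 : List String :=
    ((PySem.List.pyRange 1 (num + 1) 1).foldl (fun acc i => PySem.Int.toStr (i ^ 2) :: acc) []).reverse
  let s1 : String := PySem.Str.join "" l1
  s1.toList.foldl (fun count ch => if String.ofList [ch] == c then count + 1 else count) 0

-- ===== PORT B =====
-- the `while n > 0` loop: n, r = divmod(n, 10); if r == dig: total += 1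
-- (n = i*i is always ≥ 1 at every call site; the 0 < n guard makes the loop total)
def digLoop (n : Int) (dig : Int) (count : Int) : Int :=
  if 0 < n then
    digLoop (PySem.Int.floordiv n 10)
      dig (if PySem.Int.mod n 10 == dig then count + 1 else count)
  else count
termination_by n.toNat
decreasing_by
  rename_i h
  rw [PySem.Int.floordiv_eq_ediv_of_pos (by norm_num)]
  omega

def sq_count_alt (num : Int) (dig : Int) : Int :=
  if dig < 0 || dig > 9 then 0
  else
    (PySem.List.pyRange 1 (num + 1) 1).foldl (fun total i => digLoop (i * i) dig total) 0

-- ===== PRECONDITION & SPEC =====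
def Spec_sq_count (num : Int) (dig : Int) (out : Int) : Prop := out = sq_count_alt num dig
instance (num : Int) (dig : Int) (out : Int) : Decidable (Spec_sq_count num dig out) := by unfold Spec_sq_count; infer_instance

-- ===== CLAIM (what is proved, stated in full; the proofs are below) =====
def Claim_equal_sq_count : Prop := ∀ (num : Int) (dig : Int), Dom_sq_count num dig → Spec_sq_count num dig (sq_count num dig)

-- ===== LEMMAS AND PROOFS =====

-- the cons-accumulated list is the reversed map
theorem foldl_cons_eq_reverse_map {α β : Type} (f : α → β) (l : List α) (a : List β) :
    l.foldl (fun acc i => f i :: acc) a = (l.map f).reverse ++ a := by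
  induction l generalizing a with
  | nil => simp
  | cons x t ih => simp [ih]

-- ''.join over any list of pieces is just their concatenation
theorem join_nil_flatten (css : List (List Char)) : PySem.Chars.join [] css = css.flatten := by
  induction css with
  | nil => simp [PySem.Chars.join_nil]
  | cons a t ih =>
    cases t with
    | nil => simp [PySem.Chars.join_singleton]
    | cons b t2 => simp [PySem.Chars.join_cons_cons, ih]

-- the multiset of digit characters A looks at, as one-character strings
def sqDigits (num : Int) : List String :=
  (((PySem.List.pyRange 1 (num + 1) 1).map (fun i => PySem.Int.toChars (i * i))).flatten).map
    (fun ch => String.ofList [ch])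

theorem sq_count_eq (num dig : Int) :
    sq_count num dig = ((sqDigits num).count (PySem.Int.toStr dig) : Int) := by
  unfold sq_count sqDigits
  dsimp only
  show ((PySem.Str.join "" (((PySem.List.pyRange 1 (num + 1) 1).foldl
          (fun acc i => PySem.Int.toStr (i ^ 2) :: acc) []).reverse)).toList.foldl
      (fun count ch => if String.ofList [ch] == PySem.Int.toStr dig then count + 1 else count) 0) = _
  rw [foldl_cons_eq_reverse_map, List.append_nil, List.reverse_reverse]
  rw [← List.foldl_map (f := fun ch => String.ofList [ch])
        (g := fun (count : Int) x => if x == PySem.Int.toStr dig then count + 1 else count)]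
  rw [PySem.List.foldl_beq_add_one]
  simp [PySem.Str.toList_join, join_nil_flatten, List.map_map, PySem.Int.toList_toStr,
    Function.comp_def, pow_two]

theorem ofList_eq_iff (cs : List Char) (s : String) : String.ofList cs = s ↔ cs = s.toList := by
  constructor
  · intro h; subst h; simp [String.toList_ofList]
  · intro h; rw [h]; exact String.ofList_toList

-- Nat.toDigits is the reversed digit list rendered through Nat.digitChar
theorem toDigitsCore_eq (fuel : Nat) : ∀ (n : Nat) (ds : List Char), 0 < n → n ≤ fuel →
    Nat.toDigitsCore 10 fuel n ds = ((Nat.digits 10 n).reverse.map Nat.digitChar) ++ ds := by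
  induction fuel with
  | zero => intro n ds h0 hf; omega
  | succ fuel ih =>
    intro n ds h0 hf
    rw [Nat.digits_def' (by norm_num : (1:Nat) < 10) h0]
    by_cases hq : n / 10 = 0
    · simp [Nat.toDigitsCore, hq]
    · have hrec : Nat.toDigitsCore 10 (fuel + 1) n ds
          = Nat.toDigitsCore 10 fuel (n / 10) (Nat.digitChar (n % 10) :: ds) := by
        simp [Nat.toDigitsCore, hq]
      rw [hrec, ih (n / 10) _ (Nat.pos_of_ne_zero hq) (by omega)]
      simp

theorem toDigits_eq (n : Nat) (h : 0 < n) :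
    Nat.toDigits 10 n = (Nat.digits 10 n).reverse.map Nat.digitChar := by
  have := toDigitsCore_eq (n + 1) n [] h (by omega)
  simpa [Nat.toDigits] using this

theorem digitChar_inj (r d : Nat) (hr : r < 10) (hd : d < 10) :
    (Nat.digitChar r = Nat.digitChar d) ↔ r = d := by
  interval_cases r <;> interval_cases d <;> decide

theorem toDigits_ne_nil (n : Nat) : Nat.toDigits 10 n ≠ [] := by
  rcases Nat.eq_zero_or_pos n with h | h
  · subst h; decide
  · rw [toDigits_eq n h]
    simp [Nat.digits_ne_nil_iff_ne_zero, Nat.pos_iff_ne_zero.mp h]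

-- counting a digit character in str(m) is counting the digit in base 10
theorem countA (m : Nat) (hm : 0 < m) (d : Nat) (hd : d < 10) :
    (Nat.toDigits 10 m).countP (fun ch => ch = Nat.digitChar d) = (Nat.digits 10 m).count d := by
  rw [toDigits_eq m hm, List.countP_map, List.countP_reverse, List.count_eq_countP]
  apply List.countP_congr
  intro r hr
  have hr10 : r < 10 := Nat.digits_lt_base (by norm_num) hr
  simp only [Function.comp_apply, decide_eq_true_eq, beq_iff_eq]
  exact digitChar_inj r d hr10 hd

-- B's divmod loop tallies the digit d in the base-10 digits of m
theorem digLoop_eq (d : Int) (hd0 : 0 ≤ d) : ∀ (m : Nat) (c : Int),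
    digLoop (m : Int) d c = c + ((Nat.digits 10 m).count d.toNat : Int) := by
  intro m
  induction m using Nat.strong_induction_on with
  | _ m ih =>
    intro c
    rw [digLoop]
    by_cases h0 : 0 < (m : Int)
    · have hm : 0 < m := by exact_mod_cast h0
      have hdiv : PySem.Int.floordiv (m : Int) 10 = ((m / 10 : Nat) : Int) := by
        exact_mod_cast PySem.Int.floordiv_natCast m 10
      have hmod : PySem.Int.mod (m : Int) 10 = ((m % 10 : Nat) : Int) := by
        exact_mod_cast PySem.Int.mod_natCast m 10
      rw [if_pos h0, hdiv, hmod, ih (m / 10) (Nat.div_lt_self hm (by norm_num))]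
      rw [Nat.digits_def' (by norm_num : (1:Nat) < 10) hm, List.count_cons]
      by_cases hc : m % 10 = d.toNat
      · rw [if_pos (show (((m % 10 : Nat) : Int) == d) = true by simp [hc]; omega),
            if_pos (show (m % 10 == d.toNat) = true by simp [hc])]
        push_cast; ring
      · rw [if_neg (show ¬ ((((m % 10 : Nat) : Int) == d) = true) by simp; omega),
            if_neg (show ¬ ((m % 10 == d.toNat) = true) by simp [hc])]
        push_cast; ring
    · have hm : m = 0 := by omega
      subst hm
      rw [if_neg h0]
      simp

-- the common reference value: per square, the count of digit d among its base-10 digits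
def refSum (num : Int) (d : Nat) : Int :=
  ((PySem.List.pyRange 1 (num + 1) 1).map
    (fun i => ((Nat.digits 10 (i * i).toNat).count d : Int))).sum

theorem alt_eq (num d : Int) (h0 : 0 ≤ d) (h9 : d ≤ 9) :
    sq_count_alt num d = refSum num d.toNat := by
  unfold sq_count_alt refSum
  rw [if_neg (by simp; omega)]
  rw [PySem.List.foldl_congr_mem (PySem.List.pyRange 1 (num + 1) 1)
        (fun total i => digLoop (i * i) d total)
        (fun total i => total + ((Nat.digits 10 (i * i).toNat).count d.toNat : Int)) 0
        (by
          intro acc i hi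
          have h1 : 1 ≤ i := (PySem.List.mem_pyRange_one.mp hi).1
          have hcast : ((i * i).toNat : Int) = i * i := Int.toNat_of_nonneg (by positivity)
          show digLoop (i * i) d acc = acc + ((Nat.digits 10 (i * i).toNat).count d.toNat : Int)
          have hdl := digLoop_eq d h0 (i * i).toNat acc
          rw [hcast] at hdl
          exact hdl)]
  rw [PySem.List.foldl_add]
  simp

theorem a_eq (num d : Int) (h0 : 0 ≤ d) (h9 : d ≤ 9) :
    sq_count num d = refSum num d.toNat := by
  rw [sq_count_eq]
  unfold sqDigits refSum
  rw [List.count_eq_countP, List.countP_map, List.countP_flatten, List.map_map]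
  have hd10 : d.toNat < 10 := by omega
  have hchar : PySem.Int.toChars d = [Nat.digitChar d.toNat] := by
    interval_cases d <;> decide
  have key : ∀ i ∈ PySem.List.pyRange 1 (num + 1) 1,
      (List.countP ((fun x => x == PySem.Int.toStr d) ∘ fun ch => String.ofList [ch]) ∘
        fun i => PySem.Int.toChars (i * i)) i
      = (fun i => (Nat.digits 10 (i * i).toNat).count d.toNat) i := by
    intro i hi
    have h1 : 1 ≤ i := (PySem.List.mem_pyRange_one.mp hi).1
    have hpos : 0 < (i * i).toNat := by
      have : 1 ≤ i * i := by nlinarith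
      omega
    have htc : PySem.Int.toChars (i * i) = Nat.toDigits 10 (i * i).toNat := by
      simp [PySem.Int.toChars, not_lt.mpr (by positivity : (0:Int) ≤ i * i)]
    simp only [Function.comp_apply]
    rw [htc, ← countA (i * i).toNat hpos d.toNat hd10]
    apply List.countP_congr
    intro ch _
    simp only [Function.comp_apply, beq_iff_eq, decide_eq_true_eq]
    rw [ofList_eq_iff, PySem.Int.toList_toStr, hchar]
    simp

  rw [List.map_congr_left key, Nat.cast_list_sum, List.map_map]
  rfl

-- outside 0..9, str(dig) is never a single digit character, so A counts nothing
theorem a_zero (num d : Int) (hd : d < 0 ∨ 9 < d) : sq_count num d = 0 := by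
  rw [sq_count_eq]
  unfold sqDigits
  have hlen : (PySem.Int.toChars d).length ≠ 1 := by
    rcases hd with hneg | hbig
    · have : PySem.Int.toChars d = '-' :: Nat.toDigits 10 d.natAbs := by
        simp [PySem.Int.toChars, hneg]
      rw [this]
      have := toDigits_ne_nil d.natAbs
      cases h : Nat.toDigits 10 d.natAbs with
      | nil => exact absurd h this
      | cons a t => simp
    · have hpos : 0 < d.toNat := by omega
      have : PySem.Int.toChars d = Nat.toDigits 10 d.toNat := by
        simp [PySem.Int.toChars, not_lt.mpr (by omega : (0:Int) ≤ d)]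
      rw [this, toDigits_eq d.toNat hpos]
      simp only [List.length_map, List.length_reverse]
      have h1 : 0 < d.toNat / 10 := by omega
      rw [Nat.digits_def' (by norm_num : (1:Nat) < 10) hpos]
      have : Nat.digits 10 (d.toNat / 10) ≠ [] :=
        Nat.digits_ne_nil_iff_ne_zero.mpr (by omega)
      cases h : Nat.digits 10 (d.toNat / 10) with
      | nil => exact absurd h this
      | cons a t => simp
  have : (sqDigits num).count (PySem.Int.toStr d) = 0 := by
    rw [List.count_eq_countP]
    apply List.countP_eq_zero.mpr
    intro s hs
    unfold sqDigits at hs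
    rcases List.mem_map.mp hs with ⟨ch, _, rfl⟩
    simp only [beq_iff_eq]
    intro hcontra
    rw [ofList_eq_iff, PySem.Int.toList_toStr] at hcontra
    exact hlen (by rw [← hcontra]; rfl)
  unfold sqDigits at this
  rw [this]
  rfl

theorem alt_zero (num d : Int) (hd : d < 0 ∨ 9 < d) : sq_count_alt num d = 0 := by
  unfold sq_count_alt
  rw [if_pos (by rcases hd with h | h <;> simp <;> omega)]

-- ===== VERDICT (by name: the statement is the Claim_ definition above) =====
theorem sq_count_spec : Claim_equal_sq_count := by
  intro num dig _
  unfold Spec_sq_count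
  by_cases h : 0 ≤ dig ∧ dig ≤ 9
  · rw [a_eq num dig h.1 h.2, alt_eq num dig h.1 h.2]
  · have hd : dig < 0 ∨ 9 < dig := by omega
    rw [a_zero num dig hd, alt_zero num dig hd]
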